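-- pv_equiv track=rewrite | github.com/ariuk44/retake_exam_prep | day_19.py | isOneBalanced
-- ===== SOURCE A (Python) =====
-- def isOneBalanced(arr):
--     n = len(arr)
--     if n == 0:
--         return 1
--     i = 0
--     start_ones = 0
--     while i < n and arr[i] == 1:
--         start_ones += 1
--         i += 1
--     non_ones = 0
--     while i < n and arr[i] != 1:
--         non_ones += 1
--         i += 1
--     end_ones = 0
--     while i < n and arr[i] == 1:
--         end_ones += 1
--         i += 1
--     if i != n:
--         return 0
--     return 1 if start_ones + end_ones == non_ones else 0
-- ===== SOURCE B (Python) =====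
-- def isOneBalanced(arr):
--     idx = [i for i, x in enumerate(arr) if x != 1]
--     if not idx:
--         return 1 if not arr else 0
--     return 1 if idx[-1] - idx[0] + 1 == len(idx) and len(arr) == 2 * len(idx) else 0
-- ===== Notes on version B (the rewrite author's own statement) =====
-- stated objective: simpler
-- what changed: Replaces the three sequential index-based while-loops and phase bookkeeping with one comprehension collecting non-one indices, then a contiguity check (last-first+1 == count) and the closed-form balance len(arr) == 2*count.
import Mathlib
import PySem

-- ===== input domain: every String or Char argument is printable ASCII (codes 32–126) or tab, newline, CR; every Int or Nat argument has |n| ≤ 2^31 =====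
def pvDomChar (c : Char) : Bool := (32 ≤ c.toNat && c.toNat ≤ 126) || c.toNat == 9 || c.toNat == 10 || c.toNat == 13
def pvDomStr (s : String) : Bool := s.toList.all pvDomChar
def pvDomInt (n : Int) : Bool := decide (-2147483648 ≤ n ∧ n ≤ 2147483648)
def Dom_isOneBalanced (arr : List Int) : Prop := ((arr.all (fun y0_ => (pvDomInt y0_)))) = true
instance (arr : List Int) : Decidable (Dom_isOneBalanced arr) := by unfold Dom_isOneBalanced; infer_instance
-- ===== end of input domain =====

-- B replaces A's three sequential while-loops with one pass collecting the non-one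
-- indices, then a contiguity check and the closed-form balance n == 2*count (simpler).

-- ===== PORT A =====
-- 'while i < n and arr[i] == 1: count += 1; i += 1' over the remaining suffix
def pvLoopEq (c : Nat) : List Int → Nat × List Int
  | [] => (c, [])
  | x :: xs => if x = 1 then pvLoopEq (c + 1) xs else (c, x :: xs)

-- 'while i < n and arr[i] != 1: count += 1; i += 1'
def pvLoopNe (c : Nat) : List Int → Nat × List Int
  | [] => (c, [])
  | x :: xs => if x ≠ 1 then pvLoopNe (c + 1) xs else (c, x :: xs)

def isOneBalanced (arr : List Int) : Int :=
  if arr.length = 0 then 1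
  else
    let p1 := pvLoopEq 0 arr
    let p2 := pvLoopNe 0 p1.2
    let p3 := pvLoopEq 0 p2.2
    if p3.2 ≠ [] then 0
    else if p1.1 + p3.1 = p2.1 then 1 else 0

-- ===== PORT B =====
-- '[i for i, x in enumerate(arr) if x != 1]'
def pvNonOneIdx (k : Nat) : List Int → List Nat
  | [] => []
  | x :: xs => if x ≠ 1 then k :: pvNonOneIdx (k + 1) xs else pvNonOneIdx (k + 1) xs

def isOneBalanced_alt (arr : List Int) : Int :=
  match pvNonOneIdx 0 arr with
  | [] => if arr = [] then 1 else 0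
  | i :: rest =>
      if (i :: rest).getLastD 0 - i + 1 = (i :: rest).length ∧
         arr.length = 2 * (i :: rest).length then 1 else 0

-- ===== PRECONDITION & SPEC =====
def Spec_isOneBalanced (arr : List Int) (out : Int) : Prop := out = isOneBalanced_alt arr
instance (arr : List Int) (out : Int) : Decidable (Spec_isOneBalanced arr out) := by unfold Spec_isOneBalanced; infer_instance

-- ===== CLAIM (what is proved, stated in full; the proofs are below) =====
def Claim_equal_isOneBalanced : Prop := ∀ (arr : List Int), Dom_isOneBalanced arr → Spec_isOneBalanced arr (isOneBalanced arr)

-- ===== LEMMAS AND PROOFS =====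

theorem pvLoopEq_spec (l : List Int) (c : Nat) :
    ∃ s r, pvLoopEq c l = (c + s, r) ∧ l = List.replicate s 1 ++ r ∧
      (∀ z, r.head? = some z → z ≠ 1) := by
  induction l generalizing c with
  | nil => exact ⟨0, [], by simp [pvLoopEq]⟩
  | cons x xs ih =>
    by_cases hx : x = 1
    · obtain ⟨s, r, h1, h2, h3⟩ := ih (c + 1)
      exact ⟨s + 1, r, by simp [pvLoopEq, hx, h1, Nat.add_assoc, Nat.add_comm 1 s],
        by simp [hx, List.replicate_succ, ← h2], h3⟩
    · exact ⟨0, x :: xs, by simp [pvLoopEq, hx], by simp, by simpa using hx⟩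

theorem pvLoopNe_spec (l : List Int) (c : Nat) :
    ∃ b r, pvLoopNe c l = (c + b.length, r) ∧ l = b ++ r ∧
      (∀ z ∈ b, z ≠ 1) ∧ (∀ z, r.head? = some z → z = 1) := by
  induction l generalizing c with
  | nil => exact ⟨[], [], by simp [pvLoopNe]⟩
  | cons x xs ih =>
    by_cases hx : x = 1
    · exact ⟨[], x :: xs, by simp [pvLoopNe, hx], by simp, by simp, by simpa using hx⟩
    · obtain ⟨b, r, h1, h2, h3, h4⟩ := ih (c + 1)
      refine ⟨x :: b, r, ?_, by simp [← h2], ?_, h4⟩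
      · simp [pvLoopNe, hx, h1]; omega
      · intro z hz
        simp only [List.mem_cons] at hz
        rcases hz with rfl | hz
        · exact hx
        · exact h3 z hz

theorem pvNonOneIdx_replicate (s k : Nat) (t : List Int) :
    pvNonOneIdx k (List.replicate s 1 ++ t) = pvNonOneIdx (k + s) t := by
  induction s generalizing k with
  | zero => simp
  | succ n ih =>
    simp only [List.replicate_succ, List.cons_append, pvNonOneIdx, ne_eq,
      not_true_eq_false, if_false, ih]
    congr 1; omega

theorem pvNonOneIdx_block (b : List Int) (k : Nat) (t : List Int)
    (hb : ∀ z ∈ b, z ≠ 1) :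
    pvNonOneIdx k (b ++ t) = List.range' k b.length ++ pvNonOneIdx (k + b.length) t := by
  induction b generalizing k with
  | nil => simp
  | cons x xs ih =>
    have hx : x ≠ 1 := hb x (by simp)
    have hrec := ih (k + 1) (fun z hz => hb z (List.mem_cons_of_mem x hz))
    have hoff : k + (xs.length + 1) = k + 1 + xs.length := by omega
    simp only [List.cons_append, pvNonOneIdx, hx, ne_eq, not_false_eq_true, if_true,
      List.length_cons, List.range'_succ, List.cons_append, hrec, hoff]

theorem pvNonOneIdx_last (l : List Int) (k : Nat) (h : pvNonOneIdx k l ≠ []) :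
    k + (pvNonOneIdx k l).length ≤ (pvNonOneIdx k l).getLastD 0 + 1 := by
  induction l generalizing k with
  | nil => simp [pvNonOneIdx] at h
  | cons x xs ih =>
    by_cases hx : x = 1
    · simp only [pvNonOneIdx, hx, ne_eq, not_true_eq_false, if_false] at h ⊢
      have := ih (k + 1) h
      omega
    · simp only [pvNonOneIdx, hx, ne_eq, not_false_eq_true, if_true] at h ⊢
      rcases hL : pvNonOneIdx (k + 1) xs with _ | ⟨a, L⟩
      · simp
      · have := ih (k + 1) (by simp [hL])
        rw [hL] at this
        simp only [List.getLastD_cons, List.length_cons] at this ⊢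
        omega

theorem getLastD_append_right {l1 l2 : List Nat} (h : l2 ≠ []) (d : Nat) :
    (l1 ++ l2).getLastD d = l2.getLastD d := by
  obtain ⟨a, ha⟩ := Option.isSome_iff_exists.mp (List.getLast?_isSome.mpr h)
  rw [List.getLastD_eq_getLast?, List.getLastD_eq_getLast?, List.getLast?_append, ha]
  rfl

theorem range'_getLastD (s m : Nat) (h : 1 ≤ m) :
    (List.range' s m).getLastD 0 = s + m - 1 := by
  obtain ⟨n, rfl⟩ := Nat.exists_eq_add_of_le h
  rw [Nat.add_comm 1 n, List.range'_concat, List.getLastD_concat]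
  omega

theorem alt_cons (arr : List Int) (i : Nat) (rest : List Nat)
    (h : pvNonOneIdx 0 arr = i :: rest) :
    isOneBalanced_alt arr =
      if (i :: rest).getLastD 0 - i + 1 = (i :: rest).length ∧
         arr.length = 2 * (i :: rest).length then 1 else 0 := by
  rw [isOneBalanced_alt.eq_def, h]

-- ===== VERDICT (by name: the statement is the Claim_ definition above) =====
theorem isOneBalanced_spec : Claim_equal_isOneBalanced := by
  intro arr _
  unfold Spec_isOneBalanced
  by_cases harr : arr = []
  · subst harr; decide
  obtain ⟨s, r1, h1, hd1, hh1⟩ := pvLoopEq_spec arr 0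
  obtain ⟨b, r2, h2, hd2, hb2, hh2⟩ := pvLoopNe_spec r1 0
  obtain ⟨e, r3, h3, hd3, hh3⟩ := pvLoopEq_spec r2 0
  simp only [Nat.zero_add] at h1 h2 h3
  have hA : isOneBalanced arr =
      (if r3 ≠ [] then 0 else if s + e = b.length then 1 else 0 : Int) := by
    simp only [isOneBalanced, List.length_eq_zero_iff, harr, if_false, h1, h2, h3]
  have hidx : pvNonOneIdx 0 arr =
      List.range' s b.length ++ pvNonOneIdx (s + b.length + e) r3 := by
    rw [hd1, hd2, hd3, pvNonOneIdx_replicate, pvNonOneIdx_block _ _ _ hb2,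
      pvNonOneIdx_replicate]
    simp
  have hlen : arr.length = s + b.length + e + r3.length := by
    rw [hd1, hd2, hd3]; simp; omega
  rcases hr3 : r3 with _ | ⟨y, t⟩
  · -- r3 = []
    subst hr3
    simp only [pvNonOneIdx] at hidx
    rcases hb : b.length with _ | m
    · -- no non-ones at all
      rw [hA, isOneBalanced_alt.eq_def, hidx, hb]
      simp only [List.range'_zero, List.append_nil, ne_eq, not_true_eq_false, if_false,
        harr, if_false]
      have : s + e ≠ 0 := by
        intro h0
        apply harr
        rw [hd1, hd2, hd3]
        have hs : s = 0 := by omega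
        have he : e = 0 := by omega
        have hb0 : b = [] := List.length_eq_zero_iff.mp (by omega)
        simp [hs, he, hb0]
      simp
      omega
    · -- contiguous block of m+1 non-ones
      have hm : 1 ≤ b.length := by omega
      rw [hA, isOneBalanced_alt.eq_def, hidx]
      have hr : List.range' s b.length = s :: List.range' (s + 1) m := by
        rw [hb, List.range'_succ]
      rw [List.append_nil, hr]
      simp only [ne_eq, not_true_eq_false, if_false]
      have hlast : (s :: List.range' (s + 1) m).getLastD 0 = s + b.length - 1 := by
        rw [← hr, range'_getLastD _ _ hm]
      have hlen2 : (s :: List.range' (s + 1) m).length = b.length := by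
        simp [hb]
      rw [hlast, hlen2, hlen]
      have hc1 : s + b.length - 1 - s + 1 = b.length := by omega
      simp only [hc1, List.length_nil, Nat.add_zero, true_and]
      by_cases hcond : s + e = b.length
      · have : s + b.length + e = 2 * b.length := by omega
        simp [hcond, this]
      · have : ¬ (s + b.length + e = 2 * b.length) := by omega
        simp [hcond, this]
  · -- r3 nonempty: pattern broken, A returns 0; B's contiguity check fails
    have hy : y ≠ 1 := hh3 y (by rw [hr3]; rfl)
    have he1 : 1 ≤ e := by
      by_contra he0
      have he : e = 0 := by omega
      have : r2.head? = some y := by rw [hd3, he, hr3]; rfl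
      exact hy (hh2 y this)
    have hm1 : 1 ≤ b.length := by
      by_contra hm0
      have hb0 : b = [] := List.length_eq_zero_iff.mp (by omega)
      have : r1.head? = some 1 := by
        rw [hd2, hb0, hd3]
        rcases e with _ | n
        · omega
        · simp [List.replicate_succ]
      exact hh1 1 this rfl
    subst hr3
    have hne : pvNonOneIdx (s + b.length + e) (y :: t) ≠ [] := by
      simp [pvNonOneIdx, hy]
    have hr : List.range' s b.length = s :: List.range' (s + 1) (b.length - 1) := by
      have hn : b.length = (b.length - 1) + 1 := by omega
      conv_lhs => rw [hn]
      rw [List.range'_succ]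
    have hlast := pvNonOneIdx_last (y :: t) (s + b.length + e) hne
    have hgl : ((s :: (List.range' (s + 1) (b.length - 1) ++
        pvNonOneIdx (s + b.length + e) (y :: t)))).getLastD 0 =
        (pvNonOneIdx (s + b.length + e) (y :: t)).getLastD 0 := by
      have : (s :: (List.range' (s + 1) (b.length - 1) ++
          pvNonOneIdx (s + b.length + e) (y :: t))) =
          (s :: List.range' (s + 1) (b.length - 1)) ++
          pvNonOneIdx (s + b.length + e) (y :: t) := by simp
      rw [this, getLastD_append_right hne]
    have hlen3 : (s :: (List.range' (s + 1) (b.length - 1) ++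
        pvNonOneIdx (s + b.length + e) (y :: t))).length =
        b.length + (pvNonOneIdx (s + b.length + e) (y :: t)).length := by
      simp; omega
    have hcond : ¬ ((s :: (List.range' (s + 1) (b.length - 1) ++
        pvNonOneIdx (s + b.length + e) (y :: t))).getLastD 0 - s + 1 =
        (s :: (List.range' (s + 1) (b.length - 1) ++
        pvNonOneIdx (s + b.length + e) (y :: t))).length) := by
      rw [hgl, hlen3]
      omega
    have halt := alt_cons arr s (List.range' (s + 1) (b.length - 1) ++
        pvNonOneIdx (s + b.length + e) (y :: t))
      (by rw [hidx, hr, List.cons_append])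
    rw [hA, halt]
    rw [if_pos (by simp : (y :: t) ≠ [])]
    rw [if_neg (fun hc => hcond hc.1)]
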